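-- pv_equiv track=rewrite | github.com/NevrThrw/CAIL_task2 | utils/BinaryRelevance.py | transferTagVec
-- ===== SOURCE A (Python) =====
-- def transferTagVec(tag_dict,tags):
--     tagVec=[]
--     for key,val in tag_dict.items():
--         if key in tags:
--             tagVec.append(1)
--         else:
--             tagVec.append(0)
--     return tagVec
-- ===== SOURCE B (Python) =====
-- def transferTagVec(tag_dict, tags):
--     # Scatter approach: index each key once, then set positions hit by tags.
--     index_map = {key: i for i, key in enumerate(tag_dict)}
--     tagVec = [0] * len(tag_dict)
--     for tag in tags:
--         i = index_map.get(tag)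
--         if i is not None:
--             tagVec[i] = 1
--     return tagVec
-- ===== Notes on version B (the rewrite author's own statement) =====
-- stated objective: faster
-- what changed: Instead of scanning the whole tags list once per dict key, B builds a key-to-position index once, allocates a zero vector, and scatters a 1 for each tag found in the index.
import Mathlib
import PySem

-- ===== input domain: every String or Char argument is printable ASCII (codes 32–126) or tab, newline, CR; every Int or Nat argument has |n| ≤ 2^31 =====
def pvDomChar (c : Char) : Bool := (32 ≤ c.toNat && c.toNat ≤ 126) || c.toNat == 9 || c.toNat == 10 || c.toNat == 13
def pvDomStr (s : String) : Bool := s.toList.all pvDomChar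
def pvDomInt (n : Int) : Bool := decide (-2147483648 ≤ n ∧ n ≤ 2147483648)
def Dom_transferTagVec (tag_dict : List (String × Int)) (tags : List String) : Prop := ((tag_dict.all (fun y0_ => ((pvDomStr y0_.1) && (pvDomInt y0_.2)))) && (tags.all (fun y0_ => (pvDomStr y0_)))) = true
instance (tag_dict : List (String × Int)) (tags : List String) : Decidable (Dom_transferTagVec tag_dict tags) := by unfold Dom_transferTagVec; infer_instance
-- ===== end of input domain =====

-- B replaces A's per-key scan of tags with a one-pass key→position index and a scatter over tags (objective: faster).


-- ===== PORT A =====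
-- for key,val in tag_dict.items(): tagVec.append(1 if key in tags else 0)
def transferTagVec (tag_dict : List (String × Int)) (tags : List String) : List Int :=
  tag_dict.foldl (fun tagVec kv => if tags.contains kv.1 then tagVec ++ [1] else tagVec ++ [0]) []

-- ===== PORT B =====
-- index_map = {key: i for i, key in enumerate(tag_dict)}; tagVec = [0]*len(tag_dict);
-- for tag in tags: i = index_map.get(tag); if i is not None: tagVec[i] = 1
def transferTagVec_alt (tag_dict : List (String × Int)) (tags : List String) : List Int :=
  let keys := tag_dict.map Prod.fst
  let index_map : PySem.Dict String Int :=
    (PySem.List.enumerate keys).foldl (fun d p => d.insert p.2 p.1) PySem.Dict.empty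
  tags.foldl (fun tagVec tag =>
    match index_map.get? tag with
    | some i => PySem.List.pySetD tagVec i 1   -- index comes from enumerate, always in range
    | none => tagVec) (List.replicate keys.length (0 : Int))

-- ===== PRECONDITION & SPEC =====
-- Pre_ requires distinct keys: A's argument is a Python dict, which cannot hold duplicate
-- keys, while the assoc-list encoding also admits lists no dict represents.
def Pre_transferTagVec (tag_dict : List (String × Int)) (tags : List String) : Prop :=
  (tag_dict.map Prod.fst).Nodup
instance (tag_dict : List (String × Int)) (tags : List String) : Decidable (Pre_transferTagVec tag_dict tags) := by unfold Pre_transferTagVec; infer_instance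
def pvWitness_transferTagVec : (List (String × Int)) × List String :=
  ([("a", 1), ("b", 2), ("c", 3)], ["c", "x", "a"])
def Spec_transferTagVec (tag_dict : List (String × Int)) (tags : List String) (out : List Int) : Prop := out = transferTagVec_alt tag_dict tags
instance (tag_dict : List (String × Int)) (tags : List String) (out : List Int) : Decidable (Spec_transferTagVec tag_dict tags out) := by unfold Spec_transferTagVec; infer_instance

-- ===== CLAIM (what is proved, stated in full; the proofs are below) =====
def Claim_equal_transferTagVec : Prop := ∀ (tag_dict : List (String × Int)) (tags : List String), Dom_transferTagVec tag_dict tags → Pre_transferTagVec tag_dict tags → Spec_transferTagVec tag_dict tags (transferTagVec tag_dict tags)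

-- ===== LEMMAS AND PROOFS =====

-- proof-only abbreviations for B's two phases (definitionally B's code)
def pvIndexMap (keys : List String) : PySem.Dict String Int :=
  (PySem.List.enumerate keys).foldl (fun d p => d.insert p.2 p.1) PySem.Dict.empty

def pvStep (im : PySem.Dict String Int) (tagVec : List Int) (tag : String) : List Int :=
  match im.get? tag with
  | some i => PySem.List.pySetD tagVec i 1
  | none => tagVec

theorem alt_eq (tag_dict : List (String × Int)) (tags : List String) :
    transferTagVec_alt tag_dict tags
      = tags.foldl (pvStep (pvIndexMap (tag_dict.map Prod.fst)))
          (List.replicate (tag_dict.map Prod.fst).length (0 : Int)) := rfl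

-- A's append-fold is a map over the key column.
theorem foldA_eq_map (tags : List String) (l : List (String × Int)) (acc : List Int) :
    l.foldl (fun tagVec kv => if tags.contains kv.1 then tagVec ++ [1] else tagVec ++ [0]) acc
      = acc ++ l.map (fun kv => if tags.contains kv.1 then (1 : Int) else 0) := by
  induction l generalizing acc with
  | nil => simp
  | cons kv rest ih =>
    rw [List.foldl_cons, ih]
    by_cases h : kv.1 ∈ tags <;> simp [h]

theorem length_foldB (im : PySem.Dict String Int) (tags : List String) (vec : List Int) :
    (tags.foldl (pvStep im) vec).length = vec.length := by
  induction tags generalizing vec with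
  | nil => rfl
  | cons t rest ih =>
    simp only [List.foldl_cons]
    rw [ih]
    cases h : im.get? t with
    | none => simp [pvStep, h]
    | some i => simp [pvStep, h, PySem.List.length_pySetD]

-- Characterisation of B's index map under Nodup keys.
theorem get?_indexMap (keys : List String) (hnd : keys.Nodup) (tag : String) (i : Int) :
    (pvIndexMap keys).get? tag = some i
      ↔ ∃ (j : Nat) (h : j < keys.length), i = (j : Int) ∧ keys[j] = tag := by
  have hkeysnd : (pvIndexMap keys).keys.Nodup :=
    PySem.Dict.nodup_keys_foldl_insert_key (PySem.List.enumerate keys)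
      (fun p => p.2) (fun d p => p.1) PySem.Dict.empty PySem.Dict.nodup_keys_empty
  have hitems : (pvIndexMap keys).items
      = (PySem.Dict.empty : PySem.Dict String Int).items
        ++ (PySem.List.enumerate keys).map (fun p => (p.2, p.1)) := by
    apply PySem.Dict.items_foldl_insert_fresh
    · intro a _; exact PySem.Dict.contains_empty _
    · simpa [PySem.List.map_snd_enumerate] using hnd
  have h0 : (PySem.Dict.empty : PySem.Dict String Int).items = [] := rfl
  rw [PySem.Dict.get?_eq_some_iff_mem_items _ _ _ hkeysnd, hitems, h0, List.nil_append]
  simp only [List.mem_map]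
  constructor
  · rintro ⟨p, hp, he⟩
    rcases (PySem.List.mem_enumerate_iff _ _ _).1 hp with ⟨k, hk, hpk⟩
    refine ⟨k, hk, ?_, ?_⟩
    · have h1 : p.1 = (k : Int) := by rw [hpk]; simp
      cases he; omega
    · have h2 : p.2 = keys[k] := by rw [hpk]
      cases he; exact h2.symm
  · rintro ⟨j, hj, hi, hk⟩
    refine ⟨((j : Int), keys[j]), ?_, ?_⟩
    · exact (PySem.List.mem_enumerate_iff _ _ _).2 ⟨j, hj, by simp⟩
    · simp [hk, hi]

-- B's scatter loop, pointwise (default-indexed form to stay non-dependent).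
theorem foldB_getD (keys : List String) (hnd : keys.Nodup) (tags : List String)
    (vec : List Int) (hlen : vec.length = keys.length) (j : Nat) (hj : j < keys.length) :
    (tags.foldl (pvStep (pvIndexMap keys)) vec).getD j 0
      = if keys[j] ∈ tags then 1 else vec.getD j 0 := by
  induction tags generalizing vec with
  | nil => simp
  | cons t rest ih =>
    simp only [List.foldl_cons]
    cases hg : (pvIndexMap keys).get? t with
    | none =>
      rw [show pvStep (pvIndexMap keys) vec t = vec from by simp [pvStep, hg]]
      rw [ih vec hlen]
      have htm : keys[j] ≠ t := by
        intro he
        have hmem : t ∈ keys := he ▸ List.getElem_mem _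
        rcases List.mem_iff_getElem.1 hmem with ⟨k, hk, hek⟩
        have h2 := (get?_indexMap keys hnd t (k : Int)).2 ⟨k, hk, rfl, hek⟩
        rw [hg] at h2
        simp at h2
      simp [List.mem_cons, htm]
    | some i =>
      rcases (get?_indexMap keys hnd t i).1 hg with ⟨j0, hj0, hi, hkj0⟩
      subst hi
      rw [show pvStep (pvIndexMap keys) vec t = vec.set j0 1 by
        simp [pvStep, hg, PySem.List.pySetD_natCast]]
      rw [ih (vec.set j0 1) (by simp [hlen])]
      by_cases hr : keys[j] ∈ rest
      · simp [hr]
      · have hiff : keys[j] = t ↔ j = j0 := by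
          constructor
          · intro he
            exact hnd.getElem_inj_iff.1 (he.trans hkj0.symm)
          · intro he; subst he; exact hkj0
        by_cases ht : keys[j] = t
        · have hjj : j = j0 := hiff.1 ht
          subst hjj
          simp [hr, ht, List.getD_eq_getElem, List.getElem_set, hlen ▸ hj]
        · have hjj : j ≠ j0 := fun hh => ht (hiff.2 hh)
          have hjv : j < vec.length := hlen ▸ hj
          simp [hr, ht, List.getD_eq_getElem, List.getElem_set, hjv, Ne.symm hjj]

-- ===== VERDICT (by name: the statement is the Claim_ definition above) =====
theorem transferTagVec_spec : Claim_equal_transferTagVec := by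
  intro tag_dict tags _ hpre
  unfold Spec_transferTagVec
  rw [alt_eq]
  unfold transferTagVec
  rw [foldA_eq_map]
  have hlenB : (tags.foldl (pvStep (pvIndexMap (tag_dict.map Prod.fst)))
      (List.replicate (tag_dict.map Prod.fst).length (0 : Int))).length
      = (tag_dict.map Prod.fst).length := by
    rw [length_foldB]; simp
  apply List.ext_getElem
  · simp only [List.length_append, List.length_nil, List.length_map]
    rw [length_foldB]
    simp
  · intro j h1 h2
    have hjk : j < (tag_dict.map Prod.fst).length := by simpa using h1
    have hmain := foldB_getD (tag_dict.map Prod.fst) hpre tags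
      (List.replicate (tag_dict.map Prod.fst).length (0 : Int)) (by simp) j hjk
    rw [List.getD_eq_getElem _ _ h2] at hmain
    rw [hmain]
    simp only [List.nil_append, List.getElem_map, List.getD_eq_getElem,
      List.getElem_replicate]
    by_cases hm : (tag_dict[j]'(by simpa using hjk)).1 ∈ tags
    · simp [hm, List.getD]
    · simp [hm, List.getD]
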